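-- pv_equiv track=rewrite | github.com/Favo02/leetcode | solved/2483.MinimumPenaltyForAShop.py | calculate
-- ===== SOURCE A (Python) =====
-- def calculate(customers, closing):
--   penalty = 0
--
--   for i in range(len(customers)):
--     if (i < closing):
--       penalty += 1 if customers[i] == 'N' else 0
--     else:
--       penalty += 1 if customers[i] == 'Y' else 0
--
--   return penalty
-- ===== SOURCE B (Python) =====
-- def calculate(customers, closing):
--     # Baseline: shop closed from hour 0 => penalty = number of 'Y'.
--     penalty = sum(1 for ch in customers if ch == 'Y')
--     # Moving the closing time past a prefix char: 'N' adds 1, 'Y' removes 1.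
--     for ch in customers[:max(0, closing)]:
--         penalty += 1 if ch == 'N' else -1 if ch == 'Y' else 0
--     return penalty
-- ===== Notes on version B (the rewrite author's own statement) =====
-- stated objective: alternative
-- what changed: Replaces the positional N/Y branch per index with a difference formulation: start from the all-closed baseline (total count of 'Y') and apply a running +1/-1 delta over only the prefix before the clamped closing time.
import Mathlib
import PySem

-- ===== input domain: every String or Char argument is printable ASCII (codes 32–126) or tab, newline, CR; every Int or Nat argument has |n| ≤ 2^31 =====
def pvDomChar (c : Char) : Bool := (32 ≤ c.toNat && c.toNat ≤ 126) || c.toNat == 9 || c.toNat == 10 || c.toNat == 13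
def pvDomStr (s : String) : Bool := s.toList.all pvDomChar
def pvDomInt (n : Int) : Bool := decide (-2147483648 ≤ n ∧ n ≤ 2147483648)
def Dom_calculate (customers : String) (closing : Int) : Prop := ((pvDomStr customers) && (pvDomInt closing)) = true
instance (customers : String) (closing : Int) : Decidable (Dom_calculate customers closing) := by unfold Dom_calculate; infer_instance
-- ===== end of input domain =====

-- B is an alternative difference formulation: start from the all-closed baseline
-- (total 'Y' count) and apply a +1/-1 delta over only the prefix before the
-- clamped closing time, instead of A's index loop with a positional branch.
-- ===== PORT A =====
def calculate (customers : String) (closing : Int) : Int :=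
  (PySem.List.pyRange 0 (PySem.Str.len customers) 1).foldl
    (fun penalty i =>
      if i < closing then
        penalty + (if PySem.List.pyGetD customers.toList i ' ' == 'N' then 1 else 0)
      else
        penalty + (if PySem.List.pyGetD customers.toList i ' ' == 'Y' then 1 else 0)) 0

-- ===== PORT B =====
def calculate_alt (customers : String) (closing : Int) : Int :=
  let penalty : Int := customers.toList.foldl
    (fun a ch => if ch == 'Y' then a + 1 else a) 0
  (PySem.List.slice customers.toList none (some (max 0 closing))).foldl
    (fun p ch => p + (if ch == 'N' then 1 else if ch == 'Y' then -1 else 0)) penalty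

-- ===== PRECONDITION & SPEC =====
def Spec_calculate (customers : String) (closing : Int) (out : Int) : Prop := out = calculate_alt customers closing
instance (customers : String) (closing : Int) (out : Int) : Decidable (Spec_calculate customers closing out) := by unfold Spec_calculate; infer_instance

-- ===== CLAIM (what is proved, stated in full; the proofs are below) =====
def Claim_equal_calculate : Prop := ∀ (customers : String) (closing : Int), Dom_calculate customers closing → Spec_calculate customers closing (calculate customers closing)

-- ===== LEMMAS AND PROOFS =====

-- A's loop, read through enumerate: counts 'N' before index `closing` and 'Y' from it on.
theorem calc_loop_eq (l : List Char) (closing : Int) : ∀ (s acc : Int),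
    (PySem.List.enumerate l s).foldl
      (fun p q => if q.1 < closing then p + (if q.2 == 'N' then 1 else 0)
                  else p + (if q.2 == 'Y' then 1 else 0)) acc
      = acc + ((l.take (closing - s).toNat).count 'N' : Int)
          + ((l.drop (closing - s).toNat).count 'Y' : Int) := by
  induction l with
  | nil => intro s acc; simp [PySem.List.enumerate_nil]
  | cons x xs ih =>
    intro s acc
    rw [PySem.List.enumerate_cons, List.foldl_cons]
    by_cases h : s < closing
    · have ht : (closing - s).toNat = (closing - (s + 1)).toNat + 1 := by omega
      rw [ht]
      simp only [List.take_succ_cons, List.drop_succ_cons, if_pos h]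
      rw [ih (s + 1)]
      by_cases hx : x = 'N' <;> (simp [hx]; try ring)
    · have ht : (closing - s).toNat = 0 := by omega
      have ht2 : (closing - (s + 1)).toNat = 0 := by omega
      rw [if_neg h, ih (s + 1), ht, ht2]
      simp only [List.take_zero, List.drop_zero, List.count_cons, List.count_nil]
      by_cases hx : x = 'Y' <;> (simp [hx]; try ring)

-- B's first fold is the total 'Y' count.
theorem count_fold_eq (l : List Char) : ∀ acc : Int,
    l.foldl (fun a ch => if ch == 'Y' then a + 1 else a) acc = acc + (l.count 'Y' : Int) := by
  induction l with
  | nil => intro acc; simp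
  | cons x xs ih =>
    intro acc
    rw [List.foldl_cons, ih]
    by_cases hx : x = 'Y' <;> simp [hx, List.count_cons] <;> push_cast <;> ring

-- B's second fold adds (#N − #Y) of the traversed prefix.
theorem delta_fold_eq (t : List Char) : ∀ acc : Int,
    t.foldl (fun p ch => p + (if ch == 'N' then 1 else if ch == 'Y' then -1 else 0)) acc
      = acc + (t.count 'N' : Int) - (t.count 'Y' : Int) := by
  induction t with
  | nil => intro acc; simp
  | cons x xs ih =>
    intro acc
    rw [List.foldl_cons, ih]
    by_cases hN : x = 'N'
    · simp [hN, List.count_cons]; push_cast; ring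
    · by_cases hY : x = 'Y' <;> simp [hN, hY, List.count_cons] <;> push_cast <;> ring

-- ===== VERDICT (by name: the statement is the Claim_ definition above) =====
theorem calculate_spec : Claim_equal_calculate := by
  intro customers closing _
  simp only [Spec_calculate, calculate, calculate_alt]
  rw [PySem.List.slice_to customers.toList (le_max_left 0 closing)]
  have hc : (max 0 closing).toNat = closing.toNat := by omega
  rw [hc, count_fold_eq, delta_fold_eq]
  have he := PySem.List.enumerate_eq_map_pyRange customers.toList ' '
  have hfold := calc_loop_eq customers.toList closing 0 0
  rw [he, List.foldl_map] at hfold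
  have hsplit : (customers.toList.count 'Y' : Int)
      = ((customers.toList.take closing.toNat).count 'Y' : Int)
        + ((customers.toList.drop closing.toNat).count 'Y' : Int) := by
    have := List.take_append_drop closing.toNat customers.toList
    calc (customers.toList.count 'Y' : Int)
        = (((customers.toList.take closing.toNat) ++ (customers.toList.drop closing.toNat)).count 'Y' : Int) := by rw [this]
      _ = _ := by rw [List.count_append]; push_cast; ring
  simp only [PySem.List.len, sub_zero] at hfold
  simp only [PySem.Str.len, PySem.List.len]
  rw [hfold, hsplit]
  ring
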